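-- pv_equiv track=rewrite | github.com/chadhellkerley-code/chatbot1 | whatsapp.py | _run_counts
-- ===== SOURCE A (Python) =====
-- from typing import Any, Iterable, Iterator
--
-- def _run_counts(run: dict[str, Any]) -> tuple[int, int, int, int, int]:
--     events = run.get("events", [])
--     total = len(events)
--     sent = sum(1 for event in events if (event.get("status") or "") == "enviado")
--     failed = sum(1 for event in events if (event.get("status") or "") == "fallido")
--     pending = sum(1 for event in events if (event.get("status") or "") == "pendiente")
--     cancelled = sum(
--         1
--         for event in events
--         if (event.get("status") or "") in {"cancelado", "omitido"}
--     )
--     return total, sent, pending, cancelled, failed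
-- ===== SOURCE B (Python) =====
-- def _run_counts(run):
--     events = run.get("events", [])
--     counts = {}
--     for event in events:
--         status = event.get("status") or ""
--         counts[status] = counts.get(status, 0) + 1
--     return (
--         len(events),
--         counts.get("enviado", 0),
--         counts.get("pendiente", 0),
--         counts.get("cancelado", 0) + counts.get("omitido", 0),
--         counts.get("fallido", 0),
--     )
-- ===== Notes on version B (the rewrite author's own statement) =====
-- stated objective: alternative
-- what changed: Replaces A's four separate generator-sum scans over events with a single pass that builds a status->count table, from which the five results are read off by lookups.
import Mathlib
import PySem

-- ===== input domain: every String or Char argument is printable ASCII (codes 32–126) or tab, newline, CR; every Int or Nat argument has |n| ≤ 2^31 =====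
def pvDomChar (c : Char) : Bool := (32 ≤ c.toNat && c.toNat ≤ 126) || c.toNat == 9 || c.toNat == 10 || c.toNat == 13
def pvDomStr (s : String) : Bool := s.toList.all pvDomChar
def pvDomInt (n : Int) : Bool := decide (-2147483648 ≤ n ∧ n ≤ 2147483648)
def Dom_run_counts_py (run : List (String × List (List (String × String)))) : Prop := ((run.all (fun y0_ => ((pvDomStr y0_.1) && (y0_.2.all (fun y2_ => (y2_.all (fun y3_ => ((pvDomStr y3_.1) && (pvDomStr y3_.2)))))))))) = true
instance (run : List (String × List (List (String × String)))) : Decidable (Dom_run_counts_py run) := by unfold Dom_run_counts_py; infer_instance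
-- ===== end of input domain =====

-- B replaces A's four separate scans over the events by one counting pass into a status table
-- read off by lookups (alternative decomposition, same asymptotic cost).

-- ===== PORT A =====
-- event.get("status") or "" : for String values 'x or ""' equals get?.getD "" exactly
-- (a present empty string is falsy and yields "", which getD "" also yields).
def pvStatusA (event : List (String × String)) : String :=
  ((PySem.Dict.mk event).get? "status").getD ""

-- sum(1 for event in events if <cond>) transliterated as a foldl accumulating 0/1
def pvSumIf (events : List (List (String × String))) (p : List (String × String) → Bool) : Int :=
  events.foldl (fun acc e => if p e then acc + 1 else acc) 0

def run_counts_py (run : List (String × List (List (String × String)))) : Int × Int × Int × Int × Int :=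
  let events := (PySem.Dict.mk run).getD "events" []
  let total : Int := events.length
  let sent := pvSumIf events (fun e => pvStatusA e == "enviado")
  let failed := pvSumIf events (fun e => pvStatusA e == "fallido")
  let pending := pvSumIf events (fun e => pvStatusA e == "pendiente")
  let cancelled := pvSumIf events (fun e => pvStatusA e == "cancelado" || pvStatusA e == "omitido")
  (total, sent, pending, cancelled, failed)

-- ===== PORT B =====
def run_counts_py_alt (run : List (String × List (List (String × String)))) : Int × Int × Int × Int × Int :=
  let events := (PySem.Dict.mk run).getD "events" []
  let counts : PySem.Dict String Int :=
    events.foldl (fun counts event =>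
      let status := ((PySem.Dict.mk event).get? "status").getD ""
      counts.modify status 0 (fun c => c + 1)) (PySem.Dict.mk [])
  ((events.length : Int),
   counts.getD "enviado" 0,
   counts.getD "pendiente" 0,
   counts.getD "cancelado" 0 + counts.getD "omitido" 0,
   counts.getD "fallido" 0)

-- ===== PRECONDITION & SPEC =====
def Spec_run_counts_py (run : List (String × List (List (String × String)))) (out : Int × Int × Int × Int × Int) : Prop := out = run_counts_py_alt run
instance (run : List (String × List (List (String × String)))) (out : Int × Int × Int × Int × Int) : Decidable (Spec_run_counts_py run out) := by unfold Spec_run_counts_py; infer_instance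

-- ===== CLAIM (what is proved, stated in full; the proofs are below) =====
def Claim_equal_run_counts_py : Prop := ∀ (run : List (String × List (List (String × String)))), Dom_run_counts_py run → Spec_run_counts_py run (run_counts_py run)

-- ===== LEMMAS AND PROOFS =====

-- B's counter lookup equals A's filtered 0/1 sum for any single status key.
theorem pvCounter_getD (events : List (List (String × String))) (s : String) :
    (events.foldl (fun counts event =>
        counts.modify (((PySem.Dict.mk event).get? "status").getD "") 0 (fun c => c + 1))
      (PySem.Dict.mk ([] : List (String × Int)))).getD s 0
    = pvSumIf events (fun e => pvStatusA e == s) := by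
  have h : (events.foldl (fun counts event =>
        counts.modify (((PySem.Dict.mk event).get? "status").getD "") 0 (fun c => c + 1))
      (PySem.Dict.mk ([] : List (String × Int))))
      = ((events.map pvStatusA).foldl (fun d x => d.modify x 0 (fun c => c + 1))
          (PySem.Dict.mk ([] : List (String × Int)))) := by
    rw [List.foldl_map]; rfl
  rw [h, PySem.Dict.getD_foldl_modify_add_one, pvSumIf, PySem.List.foldl_count_if,
    List.count_eq_countP, List.countP_map]
  simp [PySem.Dict.getD, PySem.Dict.get?, Function.comp_def]

theorem run_counts_py_eq (run : List (String × List (List (String × String)))) :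
    run_counts_py run = run_counts_py_alt run := by
  unfold run_counts_py run_counts_py_alt
  refine Prod.ext rfl (Prod.ext ?_ (Prod.ext ?_ (Prod.ext ?_ ?_))) <;>
    simp only [pvCounter_getD, pvStatusA]
  -- only the cancelled component remains: one OR-scan = count "cancelado" + count "omitido"
  set events := (PySem.Dict.mk run).getD "events" [] with hev
  simp only [pvSumIf, PySem.List.foldl_count_if, zero_add]
  rw [← Nat.cast_add]
  congr 1
  induction events with
  | nil => rfl
  | cons e es ih =>
    simp only [List.countP_cons, ih]
    by_cases h1 : (((PySem.Dict.mk e).get? "status").getD "" == "cancelado") = true <;>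
      by_cases h2 : (((PySem.Dict.mk e).get? "status").getD "" == "omitido") = true <;>
        simp_all <;> omega

-- ===== VERDICT (by name: the statement is the Claim_ definition above) =====
theorem run_counts_py_spec : Claim_equal_run_counts_py := by
  intro run _
  exact run_counts_py_eq run
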